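-- pv_equiv track=rewrite | github.com/vyvas33/hopping_model | simulate.py | find_stance_cycles
-- ===== SOURCE A (Python) =====
-- def find_stance_cycles(results):
--     """
--     Find all stance phase cycles in the simulation.
--     """
--     phase = results['phase']
--     cycles = []
--     in_stance = False
--     start_idx = 0
--
--     for i in range(len(phase)):
--         if phase[i] and not in_stance:
--             # Entering stance
--             start_idx = i
--             in_stance = True
--         elif not phase[i] and in_stance:
--             # Exiting stance
--             cycles.append((start_idx, i))
--             in_stance = False
--
--     return cycles
-- ===== SOURCE B (Python) =====
-- def find_stance_cycles(results):
--     """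
--     Find all stance phase cycles in the simulation.
--
--     Edge-detection decomposition: collect all rising edges (stance starts)
--     and falling edges (stance ends) in two scans, then pair them with zip;
--     zip drops an unmatched trailing start (an incomplete final cycle).
--     """
--     phase = results['phase']
--     n = len(phase)
--     starts = [i for i in range(n) if phase[i] and (i == 0 or not phase[i - 1])]
--     ends = [i for i in range(n) if not phase[i] and i > 0 and phase[i - 1]]
--     return list(zip(starts, ends))
-- ===== Notes on version B (the rewrite author's own statement) =====
-- stated objective: alternative
-- what changed: Replaces the single stateful in_stance scan with edge detection: two scans collect rising-edge indices (starts) and falling-edge indices (ends), which zip then pairs, dropping any unmatched trailing start.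
import Mathlib
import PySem

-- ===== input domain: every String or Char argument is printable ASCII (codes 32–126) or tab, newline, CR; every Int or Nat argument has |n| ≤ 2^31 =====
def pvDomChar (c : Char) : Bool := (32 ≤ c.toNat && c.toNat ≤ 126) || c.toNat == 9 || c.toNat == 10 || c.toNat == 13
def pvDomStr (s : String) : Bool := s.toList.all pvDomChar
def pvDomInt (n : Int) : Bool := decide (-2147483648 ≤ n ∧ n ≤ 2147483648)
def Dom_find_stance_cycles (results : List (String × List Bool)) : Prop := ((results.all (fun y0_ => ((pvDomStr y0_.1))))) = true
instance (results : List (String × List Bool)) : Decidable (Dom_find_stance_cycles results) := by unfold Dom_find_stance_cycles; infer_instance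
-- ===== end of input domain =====

-- B replaces A's single stateful in_stance scan by edge detection (two scans collecting
-- rising/falling edge indices) paired with zip; an alternative decomposition, same O(n) cost.

-- ===== PORT A =====
-- loop body of A's for-loop; the state is (cycles, in_stance, start_idx)
def stanceStep (phase : List Bool) (st : List (Int × Int) × Bool × Int) (i : Int) :
    List (Int × Int) × Bool × Int :=
  if (PySem.List.pyGet? phase i).getD false && !st.2.1 then
    (st.1, true, i)
  else if !((PySem.List.pyGet? phase i).getD false) && st.2.1 then
    (st.1 ++ [(st.2.2, i)], false, st.2.2)
  else st

def stanceLoop (phase : List Bool) : List (Int × Int) × Bool × Int :=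
  (PySem.List.pyRange 0 (phase.length : Int) 1).foldl (stanceStep phase) ([], false, 0)

def find_stance_cycles (results : List (String × List Bool)) : List (Int × Int) :=
  match (PySem.Dict.mk results).get? "phase" with
  | none => []            -- results['phase'] raises KeyError here; excluded by Pre_
  | some phase => (stanceLoop phase).1

-- ===== PORT B =====
-- starts: indices i with phase[i] and (i == 0 or not phase[i-1])
def startEdges (phase : List Bool) : List Int :=
  (PySem.List.pyRange 0 (phase.length : Int) 1).filter (fun i =>
    (PySem.List.pyGet? phase i).getD false &&
      (i == 0 || !((PySem.List.pyGet? phase (i - 1)).getD false)))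

-- ends: indices i with not phase[i] and i > 0 and phase[i-1]
def endEdges (phase : List Bool) : List Int :=
  (PySem.List.pyRange 0 (phase.length : Int) 1).filter (fun i =>
    !((PySem.List.pyGet? phase i).getD false) && decide (0 < i) &&
      (PySem.List.pyGet? phase (i - 1)).getD false)

def find_stance_cycles_alt (results : List (String × List Bool)) : List (Int × Int) :=
  match (PySem.Dict.mk results).get? "phase" with
  | none => []
  | some phase => (startEdges phase).zip (endEdges phase)

-- ===== PRECONDITION & SPEC =====
-- Pre_ excludes exactly the inputs without a 'phase' key, on which Python A raises KeyError.
def Pre_find_stance_cycles (results : List (String × List Bool)) : Prop :=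
  ((PySem.Dict.mk results).get? "phase").isSome = true
instance (results : List (String × List Bool)) : Decidable (Pre_find_stance_cycles results) := by
  unfold Pre_find_stance_cycles; infer_instance

def pvWitness_find_stance_cycles : (List (String × List Bool)) :=
  [("phase", [true, true, false, true])]

def Spec_find_stance_cycles (results : List (String × List Bool)) (out : List (Int × Int)) : Prop := out = find_stance_cycles_alt results
instance (results : List (String × List Bool)) (out : List (Int × Int)) : Decidable (Spec_find_stance_cycles results out) := by unfold Spec_find_stance_cycles; infer_instance

-- ===== CLAIM (what is proved, stated in full; the proofs are below) =====
def Claim_equal_find_stance_cycles : Prop := ∀ (results : List (String × List Bool)), Dom_find_stance_cycles results → Pre_find_stance_cycles results → Spec_find_stance_cycles results (find_stance_cycles results)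

-- ===== LEMMAS AND PROOFS =====

-- last element of the phase list, defaulting to false (= A's in_stance after the loop)
def lastD (bs : List Bool) : Bool := (bs.getLast?).getD false

theorem zip_map_fst_snd' (l : List (Int × Int)) :
    (l.map Prod.fst).zip (l.map Prod.snd) = l := by
  induction l with
  | nil => rfl
  | cons x xs ih => simp [ih]

theorem zip_append_left_of_le {α β : Type} (xs t : List α) (ys : List β)
    (h : ys.length ≤ xs.length) : (xs ++ t).zip ys = xs.zip ys := by
  induction xs generalizing ys with
  | nil =>
    have : ys = [] := List.eq_nil_of_length_eq_zero (Nat.le_zero.mp h)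
    simp [this]
  | cons x xs ih =>
    cases ys with
    | nil => simp
    | cons y ys => simpa using ih ys (by simpa using h)

theorem pyGet?_append_prefix (bs : List Bool) (b : Bool) (i : Int)
    (h0 : 0 ≤ i) (h : i < (bs.length : Int)) :
    PySem.List.pyGet? (bs ++ [b]) i = PySem.List.pyGet? bs i := by
  rw [PySem.List.pyGet?_of_nonneg _ h0, PySem.List.pyGet?_of_nonneg _ h0]
  exact List.getElem?_append_left (by omega)

theorem pyGet?_snoc_last (bs : List Bool) (b : Bool) :
    PySem.List.pyGet? (bs ++ [b]) (bs.length : Int) = some b := by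
  simp

theorem pyGet?_snoc_pred (bs : List Bool) (b : Bool) (h : bs ≠ []) :
    (PySem.List.pyGet? (bs ++ [b]) ((bs.length : Int) - 1)).getD false = lastD bs := by
  have hlen : 0 < bs.length := List.length_pos_of_ne_nil h
  have hcast : (bs.length : Int) - 1 = ((bs.length - 1 : Nat) : Int) := by omega
  rw [hcast, PySem.List.pyGet?_natCast]
  rw [List.getElem?_append_left (by omega)]
  simp [lastD, List.getLast?_eq_getElem?]

theorem startEdges_snoc (bs : List Bool) (b : Bool) :
    startEdges (bs ++ [b]) =
      startEdges bs ++ (if b && !lastD bs then [(bs.length : Int)] else []) := by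
  unfold startEdges
  have hlen : (((bs ++ [b]).length : Nat) : Int) = (bs.length : Int) + 1 := by simp
  rw [hlen, PySem.List.pyRange_one_succ_right (by positivity), List.filter_append]
  congr 1
  · apply List.filter_congr
    intro i hi
    have hi' := (PySem.List.mem_pyRange_one).mp hi
    rw [pyGet?_append_prefix bs b i hi'.1 hi'.2]
    by_cases h0 : i = 0
    · simp [h0]
    · rw [pyGet?_append_prefix bs b (i - 1) (by omega) (by omega)]
  · simp only [List.filter_singleton]
    rw [pyGet?_snoc_last]
    rcases List.eq_nil_or_concat' bs with rfl | ⟨ys, y, rfl⟩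
    · simp [lastD]
    · have hne : (ys ++ [y]) ≠ [] := by simp
      rw [pyGet?_snoc_pred _ b hne]
      have hz : ¬((ys.length : Int) + 1 = 0) := by omega
      simp [hz]

theorem endEdges_snoc (bs : List Bool) (b : Bool) :
    endEdges (bs ++ [b]) =
      endEdges bs ++ (if !b && lastD bs then [(bs.length : Int)] else []) := by
  unfold endEdges
  have hlen : (((bs ++ [b]).length : Nat) : Int) = (bs.length : Int) + 1 := by simp
  rw [hlen, PySem.List.pyRange_one_succ_right (by positivity), List.filter_append]
  congr 1
  · apply List.filter_congr
    intro i hi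
    have hi' := (PySem.List.mem_pyRange_one).mp hi
    rw [pyGet?_append_prefix bs b i hi'.1 hi'.2]
    by_cases h0 : i = 0
    · simp [h0]
    · rw [pyGet?_append_prefix bs b (i - 1) (by omega) (by omega)]
  · simp only [List.filter_singleton]
    rw [pyGet?_snoc_last]
    rcases List.eq_nil_or_concat' bs with rfl | ⟨ys, y, rfl⟩
    · simp [lastD]
    · have hne : (ys ++ [y]) ≠ [] := by simp
      rw [pyGet?_snoc_pred _ b hne]
      simp

theorem stanceLoop_snoc (bs : List Bool) (b : Bool) :
    stanceLoop (bs ++ [b]) =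
      (if b && !(stanceLoop bs).2.1 then
        ((stanceLoop bs).1, true, (bs.length : Int))
      else if !b && (stanceLoop bs).2.1 then
        ((stanceLoop bs).1 ++ [((stanceLoop bs).2.2, (bs.length : Int))], false, (stanceLoop bs).2.2)
      else stanceLoop bs) := by
  unfold stanceLoop
  have hlen : (((bs ++ [b]).length : Nat) : Int) = (bs.length : Int) + 1 := by simp
  rw [hlen, PySem.List.pyRange_one_succ_right (by positivity), List.foldl_append]
  have hpref : (PySem.List.pyRange 0 (bs.length : Int) 1).foldl (stanceStep (bs ++ [b])) ([], false, 0) =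
      (PySem.List.pyRange 0 (bs.length : Int) 1).foldl (stanceStep bs) ([], false, 0) := by
    apply PySem.List.foldl_congr_mem
    intro acc i hi
    have hi' := (PySem.List.mem_pyRange_one).mp hi
    unfold stanceStep
    rw [pyGet?_append_prefix bs b i hi'.1 hi'.2]
  rw [hpref]
  simp only [List.foldl_cons, List.foldl_nil]
  unfold stanceStep
  rw [pyGet?_snoc_last]
  rfl

theorem stance_inv (bs : List Bool) :
    (stanceLoop bs).2.1 = lastD bs ∧
    startEdges bs = (stanceLoop bs).1.map Prod.fst ++
      (if (stanceLoop bs).2.1 then [(stanceLoop bs).2.2] else []) ∧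
    endEdges bs = (stanceLoop bs).1.map Prod.snd := by
  induction bs using List.reverseRecOn with
  | nil =>
    refine ⟨?_, ?_, ?_⟩ <;> simp [stanceLoop, startEdges, endEdges, lastD, PySem.List.pyRange]
  | append_singleton bs b ih =>
    obtain ⟨h1, h2, h3⟩ := ih
    have hlast : lastD (bs ++ [b]) = b := by simp [lastD]
    rw [stanceLoop_snoc, startEdges_snoc, endEdges_snoc, hlast, h1]
    cases b <;> cases hld : lastD bs <;>
      simp [h1, hld, h2, h3]
  
theorem stance_main (phase : List Bool) :
    (stanceLoop phase).1 = (startEdges phase).zip (endEdges phase) := by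
  obtain ⟨h1, h2, h3⟩ := stance_inv phase
  rw [h2, h3, zip_append_left_of_le _ _ _ (by simp), zip_map_fst_snd']

-- ===== VERDICT (by name: the statement is the Claim_ definition above) =====
theorem find_stance_cycles_spec : Claim_equal_find_stance_cycles := by
  intro results _ _
  unfold Spec_find_stance_cycles find_stance_cycles find_stance_cycles_alt
  cases h : (PySem.Dict.mk results).get? "phase" with
  | none => rfl
  | some phase => exact stance_main phase
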